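-- pv_equiv track=rewrite | github.com/mjcc4/pdf-manip | pdf_extract.py | transformer_expression_fichier
-- ===== SOURCE A (Python) =====
-- def transformer_expression_fichier(expr_nom_fichiers_extraits):
-- 	expr_transformee = ""
-- 	expr_a_traiter = expr_nom_fichiers_extraits
-- 	nbstar=1
-- 	while expr_a_traiter != "":
-- 		x,y,expr_a_traiter = expr_a_traiter.partition("*")
-- 		expr_transformee += x
-- 		if expr_a_traiter != "" and expr_a_traiter[0] != '*':
-- 			expr_transformee += '{n:0'+'{0}'.format(nbstar)+'d}'
-- 			nbstar=1
-- 		elif expr_a_traiter != "":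
-- 			nbstar+=1
-- 		elif  y != "":
-- 			expr_transformee += '{n:0'+'{0}'.format(nbstar)+'d}'
-- 	return expr_transformee
-- ===== SOURCE B (Python) =====
-- def transformer_expression_fichier(expr_nom_fichiers_extraits):
--     s = expr_nom_fichiers_extraits
--     n = len(s)
--     out = []
--     i = 0
--     while i < n:
--         if s[i] == '*':
--             j = i
--             while j < n and s[j] == '*':
--                 j += 1
--             out.append('{n:0' + str(j - i) + 'd}')
--             i = j
--         else:
--             out.append(s[i])
--             i += 1
--     return ''.join(out)
-- ===== Notes on version B (the rewrite author's own statement) =====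
-- stated objective: simpler
-- what changed: Replaces A's repeated str.partition loop with a carried star-counter by a single left-to-right index scan that consumes each maximal asterisk run at once and emits its placeholder immediately, joining the pieces at the end.
import Mathlib
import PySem

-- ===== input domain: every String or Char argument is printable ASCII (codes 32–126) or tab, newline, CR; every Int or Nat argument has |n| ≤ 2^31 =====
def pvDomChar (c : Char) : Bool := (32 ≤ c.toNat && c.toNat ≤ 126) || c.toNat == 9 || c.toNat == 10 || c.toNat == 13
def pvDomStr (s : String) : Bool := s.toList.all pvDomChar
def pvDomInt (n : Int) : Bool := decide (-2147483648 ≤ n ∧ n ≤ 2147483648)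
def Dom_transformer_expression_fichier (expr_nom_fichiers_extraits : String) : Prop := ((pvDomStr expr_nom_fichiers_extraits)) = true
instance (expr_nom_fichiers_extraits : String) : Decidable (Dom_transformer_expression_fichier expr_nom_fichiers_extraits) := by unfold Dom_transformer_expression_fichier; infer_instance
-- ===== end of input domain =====

-- B replaces A's repeated str.partition loop (with a carried star counter) by a single
-- index scan consuming each maximal '*'-run at once; objective: simpler.

-- ===== PORT A =====
-- shared helper: the placeholder text '{n:0' + str(k) + 'd}'
def phStar (k : Int) : List Char := "{n:0".toList ++ (PySem.Int.toStr k).toList ++ "d}".toList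

-- s.partition("*") on List Char: (before, found-separator?, after)
def pyPartitionStar : List Char → List Char × Bool × List Char
  | [] => ([], false, [])
  | c :: r =>
    if c = '*' then ([], true, r)
    else
      let p := pyPartitionStar r
      (c :: p.1, p.2.1, p.2.2)

-- termination helper for A's while loop (the remainder strictly shrinks when a '*' was consumed)
theorem pyPartitionStar_shrink : ∀ (l : List Char), (pyPartitionStar l).2.2 ≠ [] →
    (pyPartitionStar l).2.2.length < l.length := by
  intro l
  induction l with
  | nil => simp [pyPartitionStar]
  | cons c r ih =>
    by_cases hc : c = '*'
    · simp [pyPartitionStar, hc]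
    · simp only [pyPartitionStar, if_neg hc]
      intro h
      exact Nat.lt_succ_of_lt (ih h)

-- the while loop of A: state (expr_transformee, expr_a_traiter, nbstar)
def loopA (acc rem : List Char) (k : Int) : List Char :=
  if rem = [] then acc
  else
    let p := pyPartitionStar rem
    let acc2 := acc ++ p.1
    if _h1 : p.2.2 ≠ [] ∧ p.2.2.head? ≠ some '*' then loopA (acc2 ++ phStar k) p.2.2 1
    else if hz : p.2.2 ≠ [] then loopA acc2 p.2.2 (k + 1)
    else if p.2.1 then acc2 ++ phStar k else acc2
termination_by rem.length
decreasing_by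
  · exact pyPartitionStar_shrink rem _h1.1
  · exact pyPartitionStar_shrink rem hz

def transformer_expression_fichier (expr_nom_fichiers_extraits : String) : String :=
  String.ofList (loopA [] expr_nom_fichiers_extraits.toList 1)

-- ===== PORT B =====
-- B's single index scan: a maximal '*'-run (the inner while j loop = takeWhile/dropWhile)
-- is consumed at once and its placeholder emitted; other chars are copied.
def loopB : List Char → List Char
  | [] => []
  | c :: r =>
    if c = '*' then
      phStar (1 + ((r.takeWhile (· = '*')).length : Int)) ++ loopB (r.dropWhile (· = '*'))
    else c :: loopB r
termination_by l => l.length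
decreasing_by
  all_goals first
    | exact Nat.lt_succ_of_le (List.length_dropWhile_le _ _)
    | simp

def transformer_expression_fichier_alt (expr_nom_fichiers_extraits : String) : String :=
  String.ofList (loopB expr_nom_fichiers_extraits.toList)

-- ===== PRECONDITION & SPEC =====
def Spec_transformer_expression_fichier (expr_nom_fichiers_extraits : String) (out : String) : Prop := out = transformer_expression_fichier_alt expr_nom_fichiers_extraits
instance (expr_nom_fichiers_extraits : String) (out : String) : Decidable (Spec_transformer_expression_fichier expr_nom_fichiers_extraits out) := by unfold Spec_transformer_expression_fichier; infer_instance

-- ===== CLAIM (what is proved, stated in full; the proofs are below) =====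
def Claim_equal_transformer_expression_fichier : Prop := ∀ (expr_nom_fichiers_extraits : String), Dom_transformer_expression_fichier expr_nom_fichiers_extraits → Spec_transformer_expression_fichier expr_nom_fichiers_extraits (transformer_expression_fichier expr_nom_fichiers_extraits)

-- ===== LEMMAS AND PROOFS =====

-- proof-only characterisation of A's loop (never used by the ports)
def chA : List Char → Int → List Char
  | [], _ => []
  | c :: r, k =>
    if c = '*' then
      match r with
      | [] => phStar k
      | d :: _ => if d = '*' then chA r (k + 1) else phStar k ++ chA r 1
    else c :: chA r k

-- one-step unfolding lemmas for loopA and chA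
theorem loopA_cons_ne_star (acc : List Char) (c : Char) (r : List Char) (k : Int)
    (hc : c ≠ '*') : loopA acc (c :: r) k = loopA (acc ++ [c]) r k := by
  cases r with
  | nil =>
    rw [loopA, loopA]
    simp [pyPartitionStar, hc]
  | cons d r' =>
    rw [loopA, loopA]
    simp only [reduceCtorEq, pyPartitionStar, if_neg hc]
    split_ifs with h1 h2 <;> simp_all [List.append_assoc]

theorem loopA_star_nil (acc : List Char) (k : Int) :
    loopA acc ['*'] k = acc ++ phStar k := by
  rw [loopA]; simp [pyPartitionStar]

theorem loopA_star_star (acc : List Char) (r : List Char) (k : Int) :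
    loopA acc ('*' :: '*' :: r) k = loopA acc ('*' :: r) (k + 1) := by
  rw [loopA]; simp [pyPartitionStar]

theorem loopA_star_other (acc : List Char) (d : Char) (r : List Char) (k : Int)
    (hd : d ≠ '*') : loopA acc ('*' :: d :: r) k = loopA (acc ++ phStar k) (d :: r) 1 := by
  rw [loopA]; simp [pyPartitionStar, hd]

theorem chA_cons_ne (c : Char) (r : List Char) (k : Int) (hc : c ≠ '*') :
    chA (c :: r) k = c :: chA r k := by simp [chA, hc]

theorem chA_star_nil (k : Int) : chA ['*'] k = phStar k := by simp [chA]

theorem chA_star_star (r : List Char) (k : Int) :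
    chA ('*' :: '*' :: r) k = chA ('*' :: r) (k + 1) := by simp [chA]

theorem chA_star_other (d : Char) (r : List Char) (k : Int) (hd : d ≠ '*') :
    chA ('*' :: d :: r) k = phStar k ++ chA (d :: r) 1 := by simp [chA, hd]

theorem loopA_eq_chA (rem : List Char) : ∀ (acc : List Char) (k : Int),
    loopA acc rem k = acc ++ chA rem k := by
  induction rem with
  | nil => intro acc k; rw [loopA]; simp [chA]
  | cons c r ih =>
    intro acc k
    by_cases hc : c = '*'
    · subst hc
      cases r with
      | nil => rw [loopA_star_nil, chA_star_nil]
      | cons d r' =>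
        by_cases hd : d = '*'
        · subst hd
          rw [loopA_star_star, ih, chA_star_star]
        · rw [loopA_star_other _ _ _ _ hd, ih, chA_star_other _ _ _ hd, List.append_assoc]
    · rw [loopA_cons_ne_star _ _ _ _ hc, ih, chA_cons_ne _ _ _ hc]
      simp

theorem chA_star : ∀ (r : List Char) (k : Int),
    chA ('*' :: r) k =
      phStar (k + ((r.takeWhile (· = '*')).length : Int)) ++ (chA (r.dropWhile (· = '*')) 1) := by
  intro r
  induction r with
  | nil => intro k; simp [chA]
  | cons d r' ih =>
    intro k
    by_cases hd : d = '*'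
    · subst hd
      rw [chA_star_star, ih (k + 1)]
      simp [List.takeWhile, List.dropWhile]
      ring_nf
    · rw [chA_star_other _ _ _ hd]
      simp [hd, List.takeWhile, List.dropWhile]

theorem chA_eq_loopB : ∀ (rem : List Char), chA rem 1 = loopB rem
  | [] => by simp [chA, loopB]
  | c :: r => by
    by_cases hc : c = '*'
    · subst hc
      rw [chA_star, loopB, chA_eq_loopB (r.dropWhile (· = '*'))]
      simp
    · rw [loopB]
      simp only [if_neg hc]
      rw [chA_cons_ne _ _ _ hc, chA_eq_loopB r]
termination_by rem => rem.length
decreasing_by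
  all_goals first
    | exact Nat.lt_succ_of_le (List.length_dropWhile_le _ _)
    | simp

-- ===== VERDICT (by name: the statement is the Claim_ definition above) =====
theorem transformer_expression_fichier_spec : Claim_equal_transformer_expression_fichier := by
  intro s _
  show _ = _
  unfold transformer_expression_fichier transformer_expression_fichier_alt
  rw [loopA_eq_chA, chA_eq_loopB]
  simp
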